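-- pv_equiv track=rewrite | github.com/Jiang-Nan-A113/FInial_project | Traditional/Processing.py | action_find
-- ===== SOURCE A (Python) =====
-- def action_find(tag):
--     action_str = []
--     tag_sent = [x for x, y in enumerate(tag) if y[1] == "VBG" and "VB"]
--     if not tag_sent:
--         tag_sent = [x for x, y in enumerate(tag) if y[1] == "VBD"]
--     tag_sent = tag[tag_sent[0]]
--     for x in tag_sent:
--         action_str.append(x)
--     return action_str
-- ===== SOURCE B (Python) =====
-- def action_find(tag):
--     # Backward fold with a best-so-far candidate: walking right-to-left, a
--     # "VBG" pair always becomes the candidate (so the leftmost VBG wins);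
--     # a "VBD" pair becomes the candidate only when the current candidate is
--     # not a VBG (so VBD is only the fallback, leftmost VBD wins).
--     # No index lists are built and tag is never re-indexed.
--     best = None  # (is_vbg, pair)
--     for pair in reversed(tag):
--         if pair[1] == "VBG":
--             best = (True, pair)
--         elif pair[1] == "VBD" and (best is None or not best[0]):
--             best = (False, pair)
--     return [x for x in best[1]]
-- ===== Notes on version B (the rewrite author's own statement) =====
-- stated objective: alternative
-- what changed: A builds an index list of all VBG positions by comprehension (and a second full VBD index list if it is empty) and then indexes back into tag; B is a single backward fold that maintains the best candidate pair directly with a priority rule (VBG beats VBD, earlier beats later) and never materialises indices.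
import Mathlib
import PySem

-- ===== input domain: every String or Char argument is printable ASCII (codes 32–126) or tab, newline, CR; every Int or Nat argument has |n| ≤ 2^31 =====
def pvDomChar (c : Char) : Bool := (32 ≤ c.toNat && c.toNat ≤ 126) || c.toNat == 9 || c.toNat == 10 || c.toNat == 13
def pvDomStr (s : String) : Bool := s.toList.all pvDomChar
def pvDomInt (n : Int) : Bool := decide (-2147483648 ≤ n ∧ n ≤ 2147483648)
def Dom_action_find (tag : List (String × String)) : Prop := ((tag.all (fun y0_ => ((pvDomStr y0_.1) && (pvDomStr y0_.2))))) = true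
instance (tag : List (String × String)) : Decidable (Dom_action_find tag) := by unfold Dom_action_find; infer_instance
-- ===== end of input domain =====

-- B replaces A's staged index comprehensions + re-indexing by one backward fold
-- carrying a best-candidate pair (VBG beats VBD, earlier beats later); same cost.

-- ===== PORT A =====
def action_find (tag : List (String × String)) : List String :=
  let tag_sent : List Int :=
    (PySem.List.enumerate tag).filterMap
      (fun p => if p.2.2 == "VBG" then some p.1 else none)
  let tag_sent : List Int :=
    if tag_sent.isEmpty then
      (PySem.List.enumerate tag).filterMap
        (fun p => if p.2.2 == "VBD" then some p.1 else none)
    else tag_sent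
  match tag_sent with
  | [] => []                    -- tag_sent[0]: IndexError, excluded by Pre_
  | i :: _ =>
    match PySem.List.pyGet? tag i with
    | some pair => [pair.1, pair.2]   -- for x in tag_sent: append(x)
    | none => []

-- ===== PORT B =====
-- the loop of Source B: fold over reversed(tag) with the best-so-far candidate
def action_find_alt (tag : List (String × String)) : List String :=
  let best : Option (Bool × (String × String)) :=
    tag.reverse.foldl
      (fun best pair =>
        if pair.2 == "VBG" then some (true, pair)
        else if pair.2 == "VBD" &&
                (match best with | none => true | some b => !b.1) then
          some (false, pair)
        else best)
      none
  match best with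
  | some (_, pair) => [pair.1, pair.2]   -- [x for x in best[1]]
  | none => []                           -- best[1] on None: TypeError, excluded by Pre_

-- ===== PRECONDITION & SPEC =====
-- A raises IndexError when no pair is tagged "VBG" or "VBD"; exactly those inputs are excluded.
def Pre_action_find (tag : List (String × String)) : Prop :=
  (tag.any (fun p => p.2 == "VBG" || p.2 == "VBD")) = true
instance (tag : List (String × String)) : Decidable (Pre_action_find tag) := by
  unfold Pre_action_find; infer_instance

def pvWitness_action_find : (List (String × String)) := [("run", "VBG"), ("ate", "VBD")]

def Spec_action_find (tag : List (String × String)) (out : List String) : Prop := out = action_find_alt tag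
instance (tag : List (String × String)) (out : List String) : Decidable (Spec_action_find tag out) := by unfold Spec_action_find; infer_instance

-- ===== CLAIM (what is proved, stated in full; the proofs are below) =====
def Claim_equal_action_find : Prop := ∀ (tag : List (String × String)), Dom_action_find tag → Pre_action_find tag → Spec_action_find tag (action_find tag)

-- ===== LEMMAS AND PROOFS =====

-- A's comprehension: head? of the filtered index list = findIdx?, shifted by the start
theorem filterMap_enumerate_head? (t : String) (l : List (String × String)) (s : Int) :
    ((PySem.List.enumerate l s).filterMap
        (fun p => if p.2.2 == t then some p.1 else none)).head?
      = (l.findIdx? (fun p => p.2 == t)).map (fun k : Nat => s + (k : Int)) := by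
  induction l generalizing s with
  | nil => simp [PySem.List.enumerate_nil]
  | cons p rest ih =>
    simp only [PySem.List.enumerate_cons, List.filterMap_cons, List.findIdx?_cons]
    by_cases h : p.2 == t
    · simp [h]
    · simp only [h, Bool.false_eq_true, ite_false, ih (s + 1)]
      cases rest.findIdx? (fun p => p.2 == t)
      · simp
      · simp; ring

-- B's backward fold, seen as a foldr: first VBG pair, else first VBD pair
theorem fold_best_spec (l : List (String × String)) :
    l.reverse.foldl
      (fun best pair =>
        if pair.2 == "VBG" then some (true, pair)
        else if pair.2 == "VBD" &&
                (match best with | none => true | some b => !b.1) then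
          some (false, pair)
        else best)
      (none : Option (Bool × (String × String)))
    = match l.find? (fun p => p.2 == "VBG") with
      | some p => some (true, p)
      | none => (l.find? (fun p => p.2 == "VBD")).map (fun p => (false, p)) := by
  rw [List.foldl_reverse]
  induction l with
  | nil => simp
  | cons p rest ih =>
    simp only [List.foldr_cons, List.find?_cons, ih]
    by_cases hg : p.2 == "VBG"
    · simp [hg]
    · simp only [hg, Bool.false_eq_true, ite_false]
      cases hk : rest.find? (fun p => p.2 == "VBG") with
      | some q =>
        simp [hk]
      | none =>
        by_cases hd : p.2 == "VBD"
        · cases hk2 : rest.find? (fun p => p.2 == "VBD") <;> simp [hd, hk2]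
        · simp [hd]

-- tag[findIdx? q] is exactly find? q
theorem getElem?_findIdx? {α : Type} (q : α → Bool) (l : List α) (k : Nat)
    (h : l.findIdx? q = some k) : l[k]? = l.find? q := by
  induction l generalizing k with
  | nil => simp at h
  | cons a rest ih =>
    rw [List.findIdx?_cons] at h
    by_cases ha : q a
    · simp [ha] at h; subst h; simp [List.find?_cons, ha]
    · simp only [ha, Bool.false_eq_true, ite_false, Option.map_eq_some_iff] at h
      obtain ⟨j, hj, rfl⟩ := h
      simp [List.find?_cons, ha, ih j hj]

theorem pre_findIdx (tag : List (String × String)) (h : Pre_action_find tag) :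
    tag.findIdx? (fun p => p.2 == "VBG") ≠ none ∨
      tag.findIdx? (fun p => p.2 == "VBD") ≠ none := by
  unfold Pre_action_find at h
  rw [List.any_eq_true] at h
  obtain ⟨p, hp, hpt⟩ := h
  rcases Bool.or_eq_true_iff.mp hpt with ht | ht
  · left
    intro hn
    have := List.findIdx?_eq_none_iff.mp hn p hp
    simp [ht] at this
  · right
    intro hn
    have := List.findIdx?_eq_none_iff.mp hn p hp
    simp [ht] at this

-- ===== VERDICT (by name: the statement is the Claim_ definition above) =====
theorem action_find_spec : Claim_equal_action_find := by
  intro tag _ hpre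
  unfold Spec_action_find action_find action_find_alt
  have hA := filterMap_enumerate_head? "VBG" tag 0
  have hD := filterMap_enumerate_head? "VBD" tag 0
  rw [fold_best_spec]
  cases hg : tag.findIdx? (fun p => p.2 == "VBG") with
  | some k =>
    rw [hg] at hA
    rw [show Option.map (fun k : Nat => (0:Int) + (k:Int)) (some k) = some ((0:Int)+(k:Int)) from rfl] at hA
    obtain ⟨rest, hrest⟩ : ∃ r, ((PySem.List.enumerate tag).filterMap
        (fun p => if p.2.2 == "VBG" then some p.1 else none)) = ((0 : Int) + (k : Int)) :: r := by
      cases hcl : ((PySem.List.enumerate tag).filterMap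
        (fun p => if p.2.2 == "VBG" then some p.1 else none)) with
      | nil => rw [hcl] at hA; simp at hA
      | cons a r => rw [hcl] at hA; simp at hA; exact ⟨r, by rw [hA]; norm_num⟩
    simp only [hrest, List.isEmpty_cons, ite_false, Bool.false_eq_true]
    have : ((0 : Int) + (k : Int)) = (k : Int) := by ring
    rw [this, PySem.List.pyGet?_natCast]
    rw [getElem?_findIdx? _ _ _ hg]
    cases hf : tag.find? (fun p => p.2 == "VBG") with
    | none =>
      have hn : tag.findIdx? (fun p => p.2 == "VBG") = none :=
        List.findIdx?_eq_none_iff.mpr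
          (fun x hx => by simpa using List.find?_eq_none.mp hf x hx)
      rw [hn] at hg; exact absurd hg (by simp)
    | some q => simp
  | none =>
    rw [hg] at hA
    rw [show Option.map (fun k : Nat => (0:Int) + (k:Int)) none = none from rfl] at hA
    have hempty : ((PySem.List.enumerate tag).filterMap
        (fun p => if p.2.2 == "VBG" then some p.1 else none)) = [] :=
      List.head?_eq_none_iff.mp hA
    have hgf : tag.find? (fun p => p.2 == "VBG") = none := by
      rw [List.find?_eq_none]
      intro x hx
      have := List.findIdx?_eq_none_iff.mp hg x hx
      simpa using this
    rcases pre_findIdx tag hpre with hne | hne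
    · exact absurd hg hne
    cases hd : tag.findIdx? (fun p => p.2 == "VBD") with
    | none => exact absurd hd hne
    | some k =>
      rw [hd] at hD
      rw [show Option.map (fun k : Nat => (0:Int) + (k:Int)) (some k) = some ((0:Int)+(k:Int)) from rfl] at hD
      obtain ⟨rest, hrest⟩ : ∃ r, ((PySem.List.enumerate tag).filterMap
          (fun p => if p.2.2 == "VBD" then some p.1 else none)) = ((0 : Int) + (k : Int)) :: r := by
        cases hcl : ((PySem.List.enumerate tag).filterMap
          (fun p => if p.2.2 == "VBD" then some p.1 else none)) with
        | nil => rw [hcl] at hD; simp at hD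
        | cons a r => rw [hcl] at hD; simp at hD; exact ⟨r, by rw [hD]; norm_num⟩
      simp only [hempty, List.isEmpty_nil, ite_true, hrest, hgf]
      have : ((0 : Int) + (k : Int)) = (k : Int) := by ring
      rw [this, PySem.List.pyGet?_natCast]
      rw [getElem?_findIdx? _ _ _ hd]
      cases hf : tag.find? (fun p => p.2 == "VBD") with
      | none => exact absurd (List.findIdx?_eq_none_iff.mpr
          (fun x hx => by have := List.find?_eq_none.mp hf x hx; simpa using this)) hne
      | some q => simp
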